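-- pv_equiv track=rewrite | github.com/Nadolina-Kseniia/PRiTPO | LR5/9_3_Editing_tricks/Editing_tricks.py | longest_edit_step_ladder
-- ===== SOURCE A (Python) =====
-- def is_edit_step(word1, word2):
--     """Проверяет, можно ли преобразовать word1 в word2 за один шаг редактирования."""
--     len1 = len(word1)
--     len2 = len(word2)
--     diff = abs(len1 - len2)
--
--     if diff > 1:
--         return False
--
--     if diff == 0:    # Замена буквы
--         changes = 0
--         for i in range(len1):
--             if word1[i] != word2[i]:
--                 changes += 1
--         return changes == 1
--
--     elif len1 > len2:   # Удаление буквы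
--         for i in range(len1):
--             if word1[:i] + word1[i + 1:] == word2:
--                 return True
--         return False
--     else:    # Добавление буквы
--         for i in range(len2):
--             if word2[:i] + word2[i + 1:] == word1:
--                 return True
--         return False
--
-- def longest_edit_step_ladder(lexigraf):
--     """Вычисляет длину наибольшей лесенки редактирования."""
--     n = len(lexigraf)
--     dp = [1] * n     # dp[i] хранит длину наибольшей лесенки, заканчивающейся на dictionary[i]
--
--     for i in range(1, n):
--         for j in range(i):
--             if is_edit_step(lexigraf[j], lexigraf[i]):
--                 dp[i] = max(dp[i], dp[j] + 1)
--
--     return max(dp)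
-- ===== SOURCE B (Python) =====
-- def longest_edit_step_ladder(lexigraf):
--     """Signature-bucket DP: one left-to-right pass with hash maps keyed by
--     one-char-deletion patterns, instead of comparing every pair of words."""
--     exact = {}   # word -> best ladder ending in an earlier copy of that word
--     dels = {}    # one-char-deletion pattern of an earlier word -> best ladder
--     subs = {}    # (i, word minus char i) -> (top word, its ladder, best ladder among other words)
--     dp = []
--     for w in lexigraf:
--         d = 1
--         for i in range(len(w)):
--             pat = w[:i] + w[i + 1:]
--             w1, dp1, dp2 = subs.get((i, pat), (None, 0, 0))
--             cand = dp2 if w1 == w else dp1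
--             d = max(max(d, cand + 1), exact.get(pat, 0) + 1)
--         d = max(d, dels.get(w, 0) + 1)
--         exact[w] = max(exact.get(w, 0), d)
--         for i in range(len(w)):
--             pat = w[:i] + w[i + 1:]
--             dels[pat] = max(dels.get(pat, 0), d)
--             w1, dp1, dp2 = subs.get((i, pat), (None, 0, 0))
--             if d > dp1:
--                 subs[(i, pat)] = (w, d, dp2 if w1 == w else dp1)
--             elif w1 != w and d > dp2:
--                 subs[(i, pat)] = (w1, dp1, d)
--         dp.append(d)
--     return max(dp)
-- ===== Notes on version B (the rewrite author's own statement) =====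
-- stated objective: faster
-- what changed: Replaced the O(n^2) all-pairs edit-step DP by a single left-to-right pass that buckets words under hash maps keyed by their one-char-deletion signatures (exact word, deletion pattern, and (position, wildcard) pattern with a best/second-best pair), so each word is scored by O(L) hash lookups instead of being compared with every earlier word.
import Mathlib
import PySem

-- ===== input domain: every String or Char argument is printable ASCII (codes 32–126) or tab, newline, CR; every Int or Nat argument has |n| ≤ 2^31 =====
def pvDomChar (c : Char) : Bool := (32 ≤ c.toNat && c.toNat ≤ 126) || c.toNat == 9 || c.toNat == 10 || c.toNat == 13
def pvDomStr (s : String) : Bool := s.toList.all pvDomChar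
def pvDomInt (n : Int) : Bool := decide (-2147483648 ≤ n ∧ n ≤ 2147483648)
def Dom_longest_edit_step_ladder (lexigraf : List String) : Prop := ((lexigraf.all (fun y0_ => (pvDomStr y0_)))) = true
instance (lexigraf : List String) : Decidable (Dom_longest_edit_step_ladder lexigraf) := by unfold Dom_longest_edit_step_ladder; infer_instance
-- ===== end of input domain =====

-- B is a signature-bucket DP over hash maps (one pass, O(L) lookups per word) replacing A's all-pairs DP; equal on every non-empty list.

-- ===== PORT A =====
-- shared primitive of both Pythons: the expression  w[:i] + w[i+1:]
def pyDelAt (w : List Char) (i : Nat) : List Char :=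
  PySem.List.slice w none (some (i : Int)) ++ PySem.List.slice w (some ((i : Int) + 1)) none

def is_edit_step (word1 word2 : List Char) : Bool :=
  let len1 := word1.length
  let len2 := word2.length
  let diff := ((len1 : Int) - (len2 : Int)).natAbs
  if 1 < diff then false
  else if diff = 0 then
    ((List.range len1).foldl (fun (changes : Int) (i : Nat) =>
      if PySem.List.pyGet? word1 (i : Int) ≠ PySem.List.pyGet? word2 (i : Int)
      then changes + 1 else changes) (0 : Int)) == 1
  else if len2 < len1 then
    (List.range len1).any (fun i => pyDelAt word1 i == word2)
  else
    (List.range len2).any (fun i => pyDelAt word2 i == word1)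

def longest_edit_step_ladder (lexigraf : List String) : Int :=
  let ws := lexigraf.map String.toList
  let n := ws.length
  let dp := ((List.range n).drop 1).foldl (fun dp i =>
      (List.range i).foldl (fun dp j =>
        if is_edit_step (ws.getD j []) (ws.getD i []) then
          dp.set i (max (dp.getD i 1) (dp.getD j 1 + 1))
        else dp) dp) (List.replicate n (1 : Int))
  (PySem.List.max? dp (fun x => x)).getD 0

-- ===== PORT B =====
def bQuery (exact : PySem.Dict (List Char) Int)
    (subs : PySem.Dict (Nat × List Char) (Option (List Char) × Int × Int))
    (w : List Char) : Int :=
  (List.range w.length).foldl (fun d i =>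
    let pat := pyDelAt w i
    let t := subs.getD (i, pat) (none, 0, 0)
    let cand := if t.1 == some w then t.2.2 else t.2.1
    max (max d (cand + 1)) (exact.getD pat 0 + 1)) 1

def bUpdate (dels : PySem.Dict (List Char) Int)
    (subs : PySem.Dict (Nat × List Char) (Option (List Char) × Int × Int))
    (w : List Char) (d : Int) :
    PySem.Dict (List Char) Int × PySem.Dict (Nat × List Char) (Option (List Char) × Int × Int) :=
  (List.range w.length).foldl (fun ds i =>
    let pat := pyDelAt w i
    let dels' := ds.1.insert pat (max (ds.1.getD pat 0) d)
    let t := ds.2.getD (i, pat) (none, 0, 0)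
    let subs' :=
      if t.2.1 < d then
        ds.2.insert (i, pat) (some w, d, if t.1 == some w then t.2.2 else t.2.1)
      else if t.1 ≠ some w ∧ t.2.2 < d then
        ds.2.insert (i, pat) (t.1, t.2.1, d)
      else ds.2
    (dels', subs')) (dels, subs)

def bStep (st : PySem.Dict (List Char) Int × PySem.Dict (List Char) Int ×
      PySem.Dict (Nat × List Char) (Option (List Char) × Int × Int) × List Int)
    (w : List Char) :
    PySem.Dict (List Char) Int × PySem.Dict (List Char) Int ×
      PySem.Dict (Nat × List Char) (Option (List Char) × Int × Int) × List Int :=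
  let exact := st.1
  let dels := st.2.1
  let subs := st.2.2.1
  let dp := st.2.2.2
  let d := max (bQuery exact subs w) (dels.getD w 0 + 1)
  let exact' := exact.insert w (max (exact.getD w 0) d)
  let ds := bUpdate dels subs w d
  (exact', ds.1, ds.2, dp ++ [d])

def longest_edit_step_ladder_alt (lexigraf : List String) : Int :=
  let ws := lexigraf.map String.toList
  let st := ws.foldl bStep (PySem.Dict.empty, PySem.Dict.empty, PySem.Dict.empty, [])
  (PySem.List.max? st.2.2.2 (fun x => x)).getD 0

-- ===== PRECONDITION & SPEC =====
-- Pre_ excludes only the empty list, on which Python's max(dp) raises ValueError in both programs.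
def Pre_longest_edit_step_ladder (lexigraf : List String) : Prop := lexigraf ≠ []
instance (lexigraf : List String) : Decidable (Pre_longest_edit_step_ladder lexigraf) := by
  unfold Pre_longest_edit_step_ladder; infer_instance

def pvWitness_longest_edit_step_ladder : List String := ["a"]

def Spec_longest_edit_step_ladder (lexigraf : List String) (out : Int) : Prop :=
  out = longest_edit_step_ladder_alt lexigraf
instance (lexigraf : List String) (out : Int) : Decidable (Spec_longest_edit_step_ladder lexigraf out) := by
  unfold Spec_longest_edit_step_ladder; infer_instance

-- ===== CLAIM (what is proved, stated in full; the proofs are below) =====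
def Claim_equal_longest_edit_step_ladder : Prop := ∀ (lexigraf : List String), Dom_longest_edit_step_ladder lexigraf → Pre_longest_edit_step_ladder lexigraf → Spec_longest_edit_step_ladder lexigraf (longest_edit_step_ladder lexigraf)

-- ===== LEMMAS AND PROOFS =====

-- reference DP both programs compute: value of the best ladder ending at each word
def bestD (ps : List (List Char × Int)) (w : List Char) : Int :=
  ps.foldl (fun m e => if is_edit_step e.1 w then max m (e.2 + 1) else m) 1

def dpSpec (ws : List (List Char)) : List (List Char × Int) :=
  ws.foldl (fun ps w => ps ++ [(w, bestD ps w)]) []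

-- running max (0 = empty) of the dp values of entries satisfying a predicate
def pmax (ps : List (List Char × Int)) (p : List Char × Int → Bool) : Int :=
  ps.foldl (fun m e => if p e then max m e.2 else m) 0

-- bucket membership: entry's word has its i-th char deletion equal to pat
def bp (i : Nat) (pat : List Char) (e : List Char × Int) : Bool :=
  decide (i < e.1.length) && (pyDelAt e.1 i == pat)

-- the invariant tying one subs-triple to the dp prefix
def Inv3 (ps : List (List Char × Int)) (i : Nat) (pat : List Char)
    (t : Option (List Char) × Int × Int) : Prop :=
  t.2.1 = pmax ps (bp i pat)
  ∧ t.2.2 = pmax ps (fun e => bp i pat e && (some e.1 != t.1))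
  ∧ (t.2.1 = 0 → t = (none, 0, 0))
  ∧ (t.2.1 ≠ 0 → ∃ u, t.1 = some u ∧ (u, t.2.1) ∈ ps ∧ bp i pat (u, t.2.1) = true)

def BInv (ws : List (List Char))
    (st : PySem.Dict (List Char) Int × PySem.Dict (List Char) Int ×
      PySem.Dict (Nat × List Char) (Option (List Char) × Int × Int) × List Int) : Prop :=
  st.2.2.2 = (dpSpec ws).map (·.2)
  ∧ (∀ u, st.1.getD u 0 = pmax (dpSpec ws) (fun e => e.1 == u))
  ∧ (∀ u, st.2.1.getD u 0 =
      pmax (dpSpec ws) (fun e => (List.range e.1.length).any (fun i => pyDelAt e.1 i == u)))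
  ∧ (∀ i pat, Inv3 (dpSpec ws) i pat (st.2.2.1.getD (i, pat) (none, 0, 0)))

theorem pyDelAt_eq (w : List Char) (i : Nat) : pyDelAt w i = w.take i ++ w.drop (i + 1) := by
  unfold pyDelAt
  have h1 : ((i : Int) + 1) = ((i + 1 : Nat) : Int) := by push_cast; ring
  rw [PySem.List.slice_to_natCast, h1, PySem.List.slice_from_natCast]

theorem length_pyDelAt (w : List Char) (i : Nat) (h : i < w.length) :
    (pyDelAt w i).length = w.length - 1 := by
  rw [pyDelAt_eq]; simp; omega

-- pmax toolbox
theorem pmax_init_le (ps : List (List Char × Int)) (p : List Char × Int → Bool) (a : Int) :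
    a ≤ ps.foldl (fun m e => if p e then max m e.2 else m) a := by
  induction ps generalizing a with
  | nil => simp
  | cons e ps ih =>
    simp only [List.foldl_cons]
    refine le_trans ?_ (ih _)
    split <;> omega

theorem pmax_nonneg (ps : List (List Char × Int)) (p : List Char × Int → Bool) : 0 ≤ pmax ps p :=
  pmax_init_le ps p 0

theorem pmax_foldl_init (ps : List (List Char × Int)) (p : List Char × Int → Bool) (a : Int)
    (ha : 0 ≤ a) : ps.foldl (fun m e => if p e then max m e.2 else m) a = max a (pmax ps p) := by
  induction ps generalizing a with
  | nil => simp [pmax]; omega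
  | cons e ps ih =>
    have h0 := pmax_nonneg ps p
    by_cases hp : p e = true
    · simp only [pmax, List.foldl_cons, hp, if_true]
      rw [ih (max a e.2) (by omega), ih (max 0 e.2) (by omega)]
      omega
    · simp only [pmax, List.foldl_cons, hp, Bool.false_eq_true, if_false]
      rw [ih a ha, ih 0 (by omega)]
      omega

theorem pmax_cons (ps : List (List Char × Int)) (p : List Char × Int → Bool) (e : List Char × Int) :
    pmax (e :: ps) p = max (if p e then max 0 e.2 else 0) (pmax ps p) := by
  have h1 : pmax (e :: ps) p =
      ps.foldl (fun m e => if p e then max m e.2 else m) (if p e then max 0 e.2 else 0) := by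
    simp only [pmax, List.foldl_cons]
  rw [h1, pmax_foldl_init ps p _ (by split <;> omega)]

theorem pmax_append (ps : List (List Char × Int)) (p : List Char × Int → Bool) (e : List Char × Int) :
    pmax (ps ++ [e]) p = if p e then max (pmax ps p) e.2 else pmax ps p := by
  simp only [pmax, List.foldl_append, List.foldl_cons, List.foldl_nil]

theorem pmax_congr (ps : List (List Char × Int)) (p q : List Char × Int → Bool)
    (h : ∀ e ∈ ps, p e = q e) : pmax ps p = pmax ps q := by
  unfold pmax
  apply PySem.List.foldl_congr_mem
  intro acc e he
  rw [h e he]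

theorem le_pmax (ps : List (List Char × Int)) (p : List Char × Int → Bool) (e : List Char × Int)
    (he : e ∈ ps) (hp : p e = true) : e.2 ≤ pmax ps p := by
  induction ps with
  | nil => cases he
  | cons e' ps ih =>
    rw [pmax_cons]
    rcases List.mem_cons.mp he with h | h
    · subst h; simp only [hp, if_true]; omega
    · have := ih h; omega

theorem pmax_le (ps : List (List Char × Int)) (p : List Char × Int → Bool) (x : Int)
    (hx : 0 ≤ x) (h : ∀ e ∈ ps, p e = true → e.2 ≤ x) : pmax ps p ≤ x := by
  induction ps with
  | nil => simpa [pmax] using hx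
  | cons e ps ih =>
    rw [pmax_cons]
    have ht := ih (fun e' he' hp' => h e' (List.mem_cons_of_mem _ he') hp')
    by_cases hp : p e = true
    · have := h e (List.mem_cons_self) hp
      simp only [hp, if_true]; omega
    · simp only [hp, Bool.false_eq_true, if_false]; omega

theorem pmax_attain (ps : List (List Char × Int)) (p : List Char × Int → Bool)
    (h : pmax ps p ≠ 0) : ∃ e ∈ ps, p e = true ∧ e.2 = pmax ps p := by
  induction ps with
  | nil => simp [pmax] at h
  | cons e ps ih =>
    have hc := pmax_cons ps p e
    by_cases h0 : pmax (e :: ps) p = pmax ps p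
    · rw [h0] at h ⊢
      obtain ⟨e', he', hp', hv'⟩ := ih h
      exact ⟨e', List.mem_cons_of_mem _ he', hp', hv'⟩
    · refine ⟨e, List.mem_cons_self, ?_, ?_⟩ <;>
      · by_cases hp : p e = true <;> simp only [hp, Bool.false_eq_true, if_true, if_false] at hc <;>
          first
          | assumption
          | (have h1 := pmax_nonneg ps p; have h2 := pmax_nonneg (e :: ps) p; omega)

theorem pmax_mono (ps : List (List Char × Int)) (p q : List Char × Int → Bool)
    (h : ∀ e ∈ ps, p e = true → q e = true) : pmax ps p ≤ pmax ps q := by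
  by_cases h0 : pmax ps p = 0
  · rw [h0]; exact pmax_nonneg ps q
  · obtain ⟨e, he, hp, hv⟩ := pmax_attain ps p h0
    rw [← hv]
    exact le_pmax ps q e he (h e he hp)

theorem pmax_or (ps : List (List Char × Int)) (p q : List Char × Int → Bool) :
    pmax ps (fun e => p e || q e) = max (pmax ps p) (pmax ps q) := by
  refine le_antisymm ?_ (max_le ?_ ?_)
  · refine pmax_le ps _ _ (by have := pmax_nonneg ps p; omega) (fun e he hpq => ?_)
    rcases Bool.or_eq_true_iff.mp hpq with hp | hq
    · exact le_trans (le_pmax ps p e he hp) (le_max_left _ _)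
    · exact le_trans (le_pmax ps q e he hq) (le_max_right _ _)
  · exact pmax_mono ps _ _ (fun e _ hp => by simp [hp])
  · exact pmax_mono ps _ _ (fun e _ hq => by simp [hq])

theorem bestD_foldl (ps : List (List Char × Int)) (p : List Char × Int → Bool) (a : Int)
    (ha : 1 ≤ a) :
    ps.foldl (fun m e => if p e then max m (e.2 + 1) else m) a = max a (pmax ps p + 1) := by
  induction ps generalizing a with
  | nil => simp [pmax]; omega
  | cons e ps ih =>
    have h0 := pmax_nonneg ps p
    rw [pmax_cons]
    by_cases hp : p e = true
    · simp only [List.foldl_cons, hp, if_true]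
      rw [ih (max a (e.2 + 1)) (by omega)]
      omega
    · simp only [List.foldl_cons, hp, Bool.false_eq_true, if_false]
      rw [ih a ha]
      omega

theorem bestD_eq (ps : List (List Char × Int)) (w : List Char) :
    bestD ps w = max 1 (pmax ps (fun e => is_edit_step e.1 w) + 1) := by
  unfold bestD
  exact bestD_foldl ps _ 1 le_rfl

theorem one_le_bestD (ps : List (List Char × Int)) (w : List Char) : 1 ≤ bestD ps w := by
  rw [bestD_eq]; omega

theorem dpSpec_append (ws : List (List Char)) (w : List Char) :
    dpSpec (ws ++ [w]) = dpSpec ws ++ [(w, bestD (dpSpec ws) w)] := by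
  simp [dpSpec, List.foldl_append]

theorem dpSpec_map_fst (ws : List (List Char)) : (dpSpec ws).map (·.1) = ws := by
  induction ws using List.reverseRecOn with
  | nil => rfl
  | append_singleton ws w ih => rw [dpSpec_append]; simp [ih]

theorem dpSpec_length (ws : List (List Char)) : (dpSpec ws).length = ws.length := by
  have := congrArg List.length (dpSpec_map_fst ws)
  simpa using this

theorem delAt_eq_iff (v w : List Char) (hlen : v.length = w.length) (i : Nat)
    (hi : i < w.length) :
    pyDelAt v i = pyDelAt w i ↔ ∀ j, j < w.length → j ≠ i → v[j]? = w[j]? := by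
  rw [pyDelAt_eq, pyDelAt_eq]
  constructor
  · intro h j hj hne
    obtain ⟨h1, h2⟩ := List.append_inj h (by simp; omega)
    rcases Nat.lt_or_ge j i with hji | hji
    · have := congrArg (fun l => l[j]?) h1
      simpa [List.getElem?_take, hji] using this
    · have hj' : i + 1 ≤ j := by omega
      have := congrArg (fun l => l[j - (i + 1)]?) h2
      simp only [List.getElem?_drop] at this
      rwa [Nat.add_sub_cancel' hj'] at this
  · intro h
    have ht : v.take i = w.take i := by
      apply List.ext_getElem?
      intro j
      rw [List.getElem?_take, List.getElem?_take]
      split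
      · next hji => exact h j (by omega) (by omega)
      · rfl
    have hd : v.drop (i + 1) = w.drop (i + 1) := by
      apply List.ext_getElem?
      intro j
      rw [List.getElem?_drop, List.getElem?_drop]
      rcases Nat.lt_or_ge (i + 1 + j) w.length with hj | hj
      · exact h _ hj (by omega)
      · rw [List.getElem?_eq_none (by omega), List.getElem?_eq_none (by omega)]
    rw [ht, hd]

theorem changes_one_iff (v w : List Char) (hlen : v.length = w.length) :
    List.countP (fun i => decide (v[i]? ≠ w[i]?)) (List.range w.length) = 1 ↔
      ((∃ i, i < w.length ∧ pyDelAt v i = pyDelAt w i) ∧ v ≠ w) := by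
  constructor
  · intro h
    rw [List.countP_eq_length_filter, List.length_eq_one_iff] at h
    obtain ⟨i0, hf⟩ := h
    have hmem : i0 ∈ List.filter (fun i => decide (v[i]? ≠ w[i]?)) (List.range w.length) := by
      rw [hf]; exact List.mem_singleton.mpr rfl
    rw [List.mem_filter, List.mem_range, decide_eq_true_eq] at hmem
    obtain ⟨hi0, hmis⟩ := hmem
    have hne : v ≠ w := fun hc => hmis (by rw [hc])
    refine ⟨⟨i0, hi0, ?_⟩, hne⟩
    rw [delAt_eq_iff v w hlen i0 hi0]
    intro j hj hji
    by_contra hc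
    have : j ∈ List.filter (fun i => decide (v[i]? ≠ w[i]?)) (List.range w.length) := by
      rw [List.mem_filter, List.mem_range, decide_eq_true_eq]; exact ⟨hj, hc⟩
    rw [hf, List.mem_singleton] at this
    exact hji this
  · rintro ⟨⟨i, hi, hdel⟩, hne⟩
    have hoff := (delAt_eq_iff v w hlen i hi).mp hdel
    have hmis : v[i]? ≠ w[i]? := by
      intro hc
      apply hne
      apply List.ext_getElem?
      intro j
      rcases Nat.lt_or_ge j w.length with hj | hj
      · by_cases hji : j = i
        · rw [hji]; exact hc
        · exact hoff j hj hji
      · rw [List.getElem?_eq_none (by omega), List.getElem?_eq_none (by omega)]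
    have hcong : List.countP (fun j => decide (v[j]? ≠ w[j]?)) (List.range w.length) =
        List.countP (fun j => j == i) (List.range w.length) := by
      apply List.countP_congr
      intro j hj
      rw [List.mem_range] at hj
      by_cases hji : j = i
      · subst hji; simp [hmis]
      · simp [hji, hoff j hj hji]
    rw [hcong]
    have : List.countP (fun j => j == i) (List.range w.length) = (List.range w.length).count i :=
      rfl
    rw [this, List.count_range, if_pos hi]

theorem length_of_delAt_eq {a : List Char} {i : Nat} {b : List Char} (hi : i < a.length)
    (h : pyDelAt a i = b) : b.length = a.length - 1 := by
  have h2 := congrArg List.length h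
  rw [length_pyDelAt a i hi] at h2
  exact h2.symm

-- the edit-step characterisation: substitution / deletion / insertion via deletion patterns
theorem edit_step_char (v w : List Char) (dv : Int) :
    is_edit_step v w =
      (((List.range w.length).any (fun i =>
          (bp i (pyDelAt w i) (v, dv) && (v != w)) || (v == pyDelAt w i)))
        || (List.range v.length).any (fun i => pyDelAt v i == w)) := by
  unfold is_edit_step bp
  rw [Bool.eq_iff_iff]
  simp only [List.any_eq_true, List.mem_range, Bool.or_eq_true, Bool.and_eq_true, beq_iff_eq,
    bne_iff_ne, decide_eq_true_eq]
  by_cases hD : 1 < ((v.length : Int) - (w.length : Int)).natAbs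
  · rw [if_pos hD]
    simp only [Bool.false_eq_true, false_iff]
    rintro (⟨i, hiw, ⟨⟨hiv, hdel⟩, _⟩ | hveq⟩ | ⟨i, hiv, hdel⟩)
    · have h1 := length_of_delAt_eq hiv hdel
      have h2 := length_pyDelAt w i hiw
      omega
    · have h1 := length_of_delAt_eq hiw hveq.symm
      omega
    · have h1 := length_of_delAt_eq hiv hdel
      omega
  · by_cases h0 : ((v.length : Int) - (w.length : Int)).natAbs = 0
    · have hlen : v.length = w.length := by omega
      rw [if_neg hD, if_pos h0]
      have hcnt := PySem.List.foldl_count_if (fun i : Nat => decide (v[i]? ≠ w[i]?))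
        (List.range v.length) 0
      simp only [decide_eq_true_eq] at hcnt
      simp only [PySem.List.pyGet?_natCast]
      rw [hcnt, beq_iff_eq]
      have hiff : ((0 : Int) + (List.countP (fun i => decide (v[i]? ≠ w[i]?))
          (List.range v.length) : Nat) = 1) ↔
          List.countP (fun i => decide (v[i]? ≠ w[i]?)) (List.range w.length) = 1 := by
        rw [hlen]; omega
      rw [hiff, changes_one_iff v w hlen]
      constructor
      · rintro ⟨⟨i, hi, hdel⟩, hne⟩
        exact Or.inl ⟨i, hi, Or.inl ⟨⟨by omega, hdel⟩, hne⟩⟩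
      · rintro (⟨i, hiw, ⟨⟨hiv, hdel⟩, hne⟩ | hveq⟩ | ⟨i, hiv, hdel⟩)
        · exact ⟨⟨i, hiw, hdel⟩, hne⟩
        · exfalso
          have h1 := length_of_delAt_eq hiw hveq.symm
          omega
        · exfalso
          have h1 := length_of_delAt_eq hiv hdel
          omega
    · by_cases hgt : w.length < v.length
      · have hlv : v.length = w.length + 1 := by omega
        rw [if_neg hD, if_neg h0, if_pos hgt]
        simp only [List.any_eq_true, List.mem_range, beq_iff_eq]
        constructor
        · rintro ⟨i, hi, hdel⟩
          exact Or.inr ⟨i, hi, hdel⟩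
        · rintro (⟨i, hiw, ⟨⟨hiv, hdel⟩, _⟩ | hveq⟩ | ⟨i, hiv, hdel⟩)
          · exfalso
            have h1 := length_of_delAt_eq hiv hdel
            have h2 := length_pyDelAt w i hiw
            omega
          · exfalso
            have h1 := length_of_delAt_eq hiw hveq.symm
            omega
          · exact ⟨i, hiv, hdel⟩
      · have hlw : w.length = v.length + 1 := by omega
        rw [if_neg hD, if_neg h0, if_neg hgt]
        simp only [List.any_eq_true, List.mem_range, beq_iff_eq]
        constructor
        · rintro ⟨i, hi, hdel⟩
          exact Or.inl ⟨i, hi, Or.inr hdel.symm⟩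
        · rintro (⟨i, hiw, ⟨⟨hiv, hdel⟩, _⟩ | hveq⟩ | ⟨i, hiv, hdel⟩)
          · exfalso
            have h1 := length_of_delAt_eq hiv hdel
            have h2 := length_pyDelAt w i hiw
            omega
          · exact ⟨i, hiw, hveq.symm⟩
          · exfalso
            have h1 := length_of_delAt_eq hiv hdel
            omega

-- query correctness for one subs-triple
theorem some_bne_some (a b : List Char) : (some a != some b) = (a != b) := by
  simp [bne]

theorem inv3_query (ps : List (List Char × Int)) (i : Nat) (pat : List Char)
    (t : Option (List Char) × Int × Int) (h : Inv3 ps i pat t) (w : List Char) :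
    (if t.1 == some w then t.2.2 else t.2.1) = pmax ps (fun e => bp i pat e && (e.1 != w)) := by
  obtain ⟨h1, h2, h3, h4⟩ := h
  by_cases hw : t.1 = some w
  · have hbeq : (t.1 == some w) = true := by simp [hw]
    simp only [hbeq, if_true]
    rw [h2]
    apply pmax_congr
    intro e _
    rw [hw, some_bne_some]
  · have hbeq : (t.1 == some w) = false := by simpa using hw
    simp only [hbeq, Bool.false_eq_true, if_false]
    rw [h1]
    have hle : pmax ps (fun e => bp i pat e && (e.1 != w)) ≤ pmax ps (bp i pat) :=
      pmax_mono _ _ _ (fun e _ hp => (Bool.and_eq_true_iff.mp hp).1)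
    by_cases h0 : pmax ps (bp i pat) = 0
    · have := pmax_nonneg ps (fun e => bp i pat e && (e.1 != w))
      omega
    · obtain ⟨u, hu1, hu2, hu3⟩ := h4 (by rw [h1]; exact h0)
      have huw : u ≠ w := fun hc => hw (by rw [hu1, hc])
      have hmem : ((u, t.2.1) : List Char × Int).2 ≤
          pmax ps (fun e => bp i pat e && (e.1 != w)) := by
        apply le_pmax ps _ _ hu2
        simp only [hu3, Bool.true_and]
        exact bne_iff_ne.mpr huw
      rw [h1] at hmem
      omega

-- update correctness for one subs-triple
theorem inv3_update (ps : List (List Char × Int)) (i : Nat) (pat : List Char)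
    (t : Option (List Char) × Int × Int) (h : Inv3 ps i pat t) (w : List Char) (d : Int)
    (hd : 1 ≤ d) (hbp : bp i pat (w, d) = true) :
    Inv3 (ps ++ [(w, d)]) i pat
      (if t.2.1 < d then (some w, d, if t.1 == some w then t.2.2 else t.2.1)
       else if t.1 ≠ some w ∧ t.2.2 < d then (t.1, t.2.1, d)
       else t) := by
  obtain ⟨h1, h2, h3, h4⟩ := h
  have hq := inv3_query ps i pat t ⟨h1, h2, h3, h4⟩ w
  have hM : pmax (ps ++ [(w, d)]) (bp i pat) = max (pmax ps (bp i pat)) d := by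
    rw [pmax_append]; simp [hbp]
  by_cases hlt : t.2.1 < d
  · rw [if_pos hlt]
    refine ⟨?_, ?_, ?_, ?_⟩
    · show d = pmax (ps ++ [(w, d)]) (bp i pat)
      rw [hM, ← h1]; omega
    · show (if t.1 == some w then t.2.2 else t.2.1) =
        pmax (ps ++ [(w, d)]) (fun e => bp i pat e && (some e.1 != some w))
      rw [pmax_append]
      simp only [bne_self_eq_false, Bool.and_false, Bool.false_eq_true, if_false]
      rw [hq]
      apply pmax_congr
      intro e _
      rw [some_bne_some]
    · intro h0; exfalso; simp only at h0; omega
    · intro _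
      refine ⟨w, rfl, ?_, ?_⟩
      · simp
      · exact hbp
  · by_cases hsnd : t.1 ≠ some w ∧ t.2.2 < d
    · rw [if_neg hlt, if_pos hsnd]
      refine ⟨?_, ?_, ?_, ?_⟩
      · show t.2.1 = pmax (ps ++ [(w, d)]) (bp i pat)
        rw [hM, ← h1]; omega
      · show d = pmax (ps ++ [(w, d)]) (fun e => bp i pat e && (some e.1 != t.1))
        rw [pmax_append]
        have hne : (some w != t.1) = true := bne_iff_ne.mpr (fun hc => hsnd.1 hc.symm)
        simp only [hbp, hne, Bool.and_true, if_true]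
        rw [← h2]; omega
      · intro h0; exfalso; simp only at h0; omega
      · intro _
        obtain ⟨u, hu1, hu2, hu3⟩ := h4 (by omega)
        exact ⟨u, hu1, List.mem_append_left _ hu2, hu3⟩
    · rw [if_neg hlt, if_neg hsnd]
      refine ⟨?_, ?_, ?_, ?_⟩
      · rw [hM, ← h1]; omega
      · rw [pmax_append]
        by_cases hw : t.1 = some w
        · have : (some w != t.1) = false := by rw [hw]; exact bne_self_eq_false _
          simp only [this, Bool.and_false, Bool.false_eq_true, if_false]
          exact h2
        · have hne : (some w != t.1) = true := bne_iff_ne.mpr (fun hc => hw hc.symm)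
          simp only [hbp, hne, Bool.and_true, if_true]
          have hd2 : d ≤ t.2.2 := by
            rcases not_and_or.mp hsnd with hc | hc
            · exact absurd hw (by simpa using hc)
            · omega
          rw [← h2]; omega
      · intro h0; exfalso; omega
      · intro _
        obtain ⟨u, hu1, hu2, hu3⟩ := h4 (by omega)
        exact ⟨u, hu1, List.mem_append_left _ hu2, hu3⟩

theorem inv3_frame (ps : List (List Char × Int)) (i : Nat) (pat : List Char)
    (t : Option (List Char) × Int × Int) (h : Inv3 ps i pat t) (w : List Char) (d : Int)
    (hbp : bp i pat (w, d) = false) : Inv3 (ps ++ [(w, d)]) i pat t := by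
  obtain ⟨h1, h2, h3, h4⟩ := h
  refine ⟨?_, ?_, h3, ?_⟩
  · rw [pmax_append]; simp only [hbp, Bool.false_eq_true, if_false]; exact h1
  · rw [pmax_append]; simp only [hbp, Bool.false_and, Bool.false_eq_true, if_false]; exact h2
  · intro h0
    obtain ⟨u, hu1, hu2, hu3⟩ := h4 h0
    exact ⟨u, hu1, List.mem_append_left _ hu2, hu3⟩

def updT (w : List Char) (d : Int) (t : Option (List Char) × Int × Int) :
    Option (List Char) × Int × Int :=
  if t.2.1 < d then (some w, d, if t.1 == some w then t.2.2 else t.2.1)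
  else if t.1 ≠ some w ∧ t.2.2 < d then (t.1, t.2.1, d)
  else t

theorem pmax_false (ps : List (List Char × Int)) : pmax ps (fun _ => false) = 0 := by
  induction ps with
  | nil => rfl
  | cons e ps ih => rw [pmax_cons, ih]; simp

theorem pmax_range (ps : List (List Char × Int)) (q : Nat → List Char × Int → Bool) (n : Nat)
    (a : Int) (ha : 1 ≤ a) :
    (List.range n).foldl (fun m i => max m (pmax ps (q i) + 1)) a
      = max a (pmax ps (fun e => (List.range n).any (fun i => q i e)) + 1) := by
  induction n with
  | zero =>
    rw [List.range_zero]
    simp only [List.foldl_nil, List.any_nil]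
    rw [pmax_false]
    omega
  | succ n ih =>
    rw [List.range_succ, List.foldl_append, ih]
    simp only [List.foldl_cons, List.foldl_nil]
    have hco : pmax ps (fun e => (List.range n ++ [n]).any (fun i => q i e))
        = max (pmax ps (fun e => (List.range n).any (fun i => q i e))) (pmax ps (q n)) := by
      rw [← pmax_or]
      apply pmax_congr
      intro e _
      rw [List.any_append]
      simp
    rw [hco]
    have n1 := pmax_nonneg ps (fun e => (List.range n).any (fun i => q i e))
    have n2 := pmax_nonneg ps (q n)
    omega

theorem bQuery_eq (ws : List (List Char)) (exact : PySem.Dict (List Char) Int)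
    (subs : PySem.Dict (Nat × List Char) (Option (List Char) × Int × Int)) (w : List Char)
    (hex : ∀ u, exact.getD u 0 = pmax (dpSpec ws) (fun e => e.1 == u))
    (hsub : ∀ i pat, Inv3 (dpSpec ws) i pat (subs.getD (i, pat) (none, 0, 0))) :
    bQuery exact subs w = max 1 (pmax (dpSpec ws)
      (fun e => (List.range w.length).any (fun i =>
        (bp i (pyDelAt w i) e && (e.1 != w)) || (e.1 == pyDelAt w i))) + 1) := by
  unfold bQuery
  have hcongr : (List.range w.length).foldl (fun d i =>
      let pat := pyDelAt w i
      let t := subs.getD (i, pat) (none, 0, 0)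
      let cand := if t.1 == some w then t.2.2 else t.2.1
      max (max d (cand + 1)) (exact.getD pat 0 + 1)) 1 =
    (List.range w.length).foldl (fun d i =>
      max d (pmax (dpSpec ws) (fun e =>
        (bp i (pyDelAt w i) e && (e.1 != w)) || (e.1 == pyDelAt w i)) + 1)) 1 := by
    apply PySem.List.foldl_congr_mem
    intro d i _
    show max (max d ((if (subs.getD (i, pyDelAt w i) (none, 0, 0)).1 == some w
        then (subs.getD (i, pyDelAt w i) (none, 0, 0)).2.2
        else (subs.getD (i, pyDelAt w i) (none, 0, 0)).2.1) + 1))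
        (exact.getD (pyDelAt w i) 0 + 1) = _
    rw [inv3_query (dpSpec ws) i (pyDelAt w i) _ (hsub i (pyDelAt w i)) w,
      hex (pyDelAt w i), pmax_or]
    have n1 := pmax_nonneg (dpSpec ws) (fun e => bp i (pyDelAt w i) e && (e.1 != w))
    have n2 := pmax_nonneg (dpSpec ws) (fun e => e.1 == pyDelAt w i)
    omega
  rw [hcongr, pmax_range (dpSpec ws) _ w.length 1 le_rfl]

theorem bD_eq (ws : List (List Char))
    (st : PySem.Dict (List Char) Int × PySem.Dict (List Char) Int ×
      PySem.Dict (Nat × List Char) (Option (List Char) × Int × Int) × List Int)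
    (h : BInv ws st) (w : List Char) :
    max (bQuery st.1 st.2.2.1 w) (st.2.1.getD w 0 + 1) = bestD (dpSpec ws) w := by
  obtain ⟨hdp, hex, hdl, hsub⟩ := h
  rw [bQuery_eq ws st.1 st.2.2.1 w hex hsub, hdl w, bestD_eq]
  have hco : pmax (dpSpec ws) (fun e => is_edit_step e.1 w)
      = max (pmax (dpSpec ws) (fun e => (List.range w.length).any (fun i =>
          (bp i (pyDelAt w i) e && (e.1 != w)) || (e.1 == pyDelAt w i))))
        (pmax (dpSpec ws) (fun e =>
          (List.range e.1.length).any (fun i => pyDelAt e.1 i == w))) := by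
    rw [← pmax_or]
    apply pmax_congr
    intro e _
    exact edit_step_char e.1 w e.2
  rw [hco]
  have n1 := pmax_nonneg (dpSpec ws) (fun e => (List.range w.length).any (fun i =>
    (bp i (pyDelAt w i) e && (e.1 != w)) || (e.1 == pyDelAt w i)))
  have n2 := pmax_nonneg (dpSpec ws) (fun e =>
    (List.range e.1.length).any (fun i => pyDelAt e.1 i == w))
  omega

theorem bUpdate_eq (dels : PySem.Dict (List Char) Int)
    (subs : PySem.Dict (Nat × List Char) (Option (List Char) × Int × Int))
    (w : List Char) (d : Int) :
    bUpdate dels subs w d =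
      ((List.range w.length).foldl (fun dl i =>
          dl.insert (pyDelAt w i) (max (dl.getD (pyDelAt w i) 0) d)) dels,
       (List.range w.length).foldl (fun sb i =>
          let t := sb.getD (i, pyDelAt w i) (none, 0, 0)
          if t.2.1 < d then
            sb.insert (i, pyDelAt w i) (some w, d, if t.1 == some w then t.2.2 else t.2.1)
          else if t.1 ≠ some w ∧ t.2.2 < d then sb.insert (i, pyDelAt w i) (t.1, t.2.1, d)
          else sb) subs) := by
  unfold bUpdate
  exact PySem.List.foldl_prod_mk
    (fun dl i => dl.insert (pyDelAt w i) (max (dl.getD (pyDelAt w i) 0) d))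
    (fun sb i =>
      let t := sb.getD (i, pyDelAt w i) (none, 0, 0)
      if t.2.1 < d then
        sb.insert (i, pyDelAt w i) (some w, d, if t.1 == some w then t.2.2 else t.2.1)
      else if t.1 ≠ some w ∧ t.2.2 < d then sb.insert (i, pyDelAt w i) (t.1, t.2.1, d)
      else sb)
    (List.range w.length) dels subs

theorem dels_fold (w : List Char) (d : Int) (n : Nat) (dl : PySem.Dict (List Char) Int) :
    ∀ (u : List Char),
    ((List.range n).foldl (fun dl i =>
        dl.insert (pyDelAt w i) (max (dl.getD (pyDelAt w i) 0) d)) dl).getD u 0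
      = if (List.range n).any (fun i => pyDelAt w i == u) then max (dl.getD u 0) d
        else dl.getD u 0 := by
  induction n with
  | zero => intro u; simp
  | succ n ih =>
    intro u
    rw [List.range_succ, List.foldl_append]
    simp only [List.foldl_cons, List.foldl_nil]
    rw [PySem.Dict.getD_insert, List.any_append]
    simp only [List.any_cons, List.any_nil, Bool.or_false]
    by_cases hu : u = pyDelAt w n
    · subst hu
      rw [if_pos rfl, ih]
      have hb : (pyDelAt w n == pyDelAt w n) = true := by simp
      rw [hb, if_pos (Bool.or_true _)]
      by_cases hany : ((List.range n).any fun i => pyDelAt w i == pyDelAt w n) = true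
      · rw [if_pos hany]
        omega
      · rw [if_neg hany]
    · rw [if_neg hu, ih u]
      have hb : (pyDelAt w n == u) = false := beq_eq_false_iff_ne.mpr (fun hc => hu hc.symm)
      rw [hb]
      simp

theorem subs_fold (w : List Char) (d : Int) (n : Nat)
    (sb : PySem.Dict (Nat × List Char) (Option (List Char) × Int × Int)) :
    ∀ (j : Nat) (pat : List Char),
    ((List.range n).foldl (fun sb i =>
        let t := sb.getD (i, pyDelAt w i) (none, 0, 0)
        if t.2.1 < d then
          sb.insert (i, pyDelAt w i) (some w, d, if t.1 == some w then t.2.2 else t.2.1)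
        else if t.1 ≠ some w ∧ t.2.2 < d then sb.insert (i, pyDelAt w i) (t.1, t.2.1, d)
        else sb) sb).getD (j, pat) (none, 0, 0)
      = if j < n ∧ pyDelAt w j = pat then updT w d (sb.getD (j, pat) (none, 0, 0))
        else sb.getD (j, pat) (none, 0, 0) := by
  induction n with
  | zero => intro j pat; simp
  | succ n ih =>
    intro j pat
    rw [List.range_succ, List.foldl_append]
    simp only [List.foldl_cons, List.foldl_nil]
    have htn : ((List.range n).foldl (fun sb i =>
        let t := sb.getD (i, pyDelAt w i) (none, 0, 0)
        if t.2.1 < d then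
          sb.insert (i, pyDelAt w i) (some w, d, if t.1 == some w then t.2.2 else t.2.1)
        else if t.1 ≠ some w ∧ t.2.2 < d then sb.insert (i, pyDelAt w i) (t.1, t.2.1, d)
        else sb) sb).getD (n, pyDelAt w n) (none, 0, 0)
        = sb.getD (n, pyDelAt w n) (none, 0, 0) := by
      rw [ih n (pyDelAt w n), if_neg (by omega)]
    by_cases hkey : j = n ∧ pyDelAt w j = pat
    · obtain ⟨hj, hpat⟩ := hkey
      have hkeq : ((j, pat) : Nat × List Char) = (n, pyDelAt w n) := by rw [hj, ← hpat, hj]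
      have hcond : j < n + 1 ∧ pyDelAt w j = pat := ⟨by omega, hpat⟩
      rw [if_pos hcond, hkeq]
      simp only [htn, updT]
      set t := sb.getD (n, pyDelAt w n) (none, 0, 0) with hT
      by_cases hb1 : t.2.1 < d
      · rw [if_pos hb1, if_pos hb1, PySem.Dict.getD_insert, if_pos rfl]
      · rw [if_neg hb1, if_neg hb1]
        by_cases hb2 : t.1 ≠ some w ∧ t.2.2 < d
        · rw [if_pos hb2, if_pos hb2, PySem.Dict.getD_insert, if_pos rfl]
        · rw [if_neg hb2, if_neg hb2, ih n (pyDelAt w n), if_neg (by omega)]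
    · have hne : ((j, pat) : Nat × List Char) ≠ (n, pyDelAt w n) := by
        intro hc
        injection hc with hc1 hc2
        exact hkey ⟨hc1, by rw [hc1, ← hc2]⟩
      have hfin : (if j < n + 1 ∧ pyDelAt w j = pat then updT w d (sb.getD (j, pat) (none, 0, 0))
            else sb.getD (j, pat) (none, 0, 0))
          = if j < n ∧ pyDelAt w j = pat then updT w d (sb.getD (j, pat) (none, 0, 0))
            else sb.getD (j, pat) (none, 0, 0) := by
        by_cases hc : j < n ∧ pyDelAt w j = pat
        · rw [if_pos hc, if_pos ⟨by omega, hc.2⟩]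
        · rw [if_neg hc, if_neg (by
            rintro ⟨hlt, hp⟩
            rcases Nat.lt_succ_iff_lt_or_eq.mp hlt with hx | hx
            · exact hc ⟨hx, hp⟩
            · exact hkey ⟨hx, hp⟩)]
      rw [hfin]
      simp only [htn]
      set t := sb.getD (n, pyDelAt w n) (none, 0, 0) with hT
      by_cases hb1 : t.2.1 < d
      · rw [if_pos hb1, PySem.Dict.getD_insert, if_neg hne, ih j pat]
      · rw [if_neg hb1]
        by_cases hb2 : t.1 ≠ some w ∧ t.2.2 < d
        · rw [if_pos hb2, PySem.Dict.getD_insert, if_neg hne, ih j pat]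
        · rw [if_neg hb2, ih j pat]

theorem bInv_step (ws : List (List Char))
    (st : PySem.Dict (List Char) Int × PySem.Dict (List Char) Int ×
      PySem.Dict (Nat × List Char) (Option (List Char) × Int × Int) × List Int)
    (h : BInv ws st) (w : List Char) :
    BInv (ws ++ [w]) (bStep st w) := by
  have hd := bD_eq ws st h w
  obtain ⟨hdp, hex, hdl, hsub⟩ := h
  have hd1 : 1 ≤ bestD (dpSpec ws) w := one_le_bestD _ _
  have hb1 : (bStep st w).1 =
      st.1.insert w (max (st.1.getD w 0) (max (bQuery st.1 st.2.2.1 w) (st.2.1.getD w 0 + 1))) :=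
    rfl
  have hb2 : (bStep st w).2.1 =
      (bUpdate st.2.1 st.2.2.1 w (max (bQuery st.1 st.2.2.1 w) (st.2.1.getD w 0 + 1))).1 := rfl
  have hb3 : (bStep st w).2.2.1 =
      (bUpdate st.2.1 st.2.2.1 w (max (bQuery st.1 st.2.2.1 w) (st.2.1.getD w 0 + 1))).2 := rfl
  have hb4 : (bStep st w).2.2.2 =
      st.2.2.2 ++ [max (bQuery st.1 st.2.2.1 w) (st.2.1.getD w 0 + 1)] := rfl
  unfold BInv
  rw [hb1, hb2, hb3, hb4, hd, bUpdate_eq, dpSpec_append]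
  refine ⟨?_, ?_, ?_, ?_⟩
  · rw [List.map_append, hdp]
    rfl
  · intro u
    rw [PySem.Dict.getD_insert, pmax_append]
    by_cases hu : u = w
    · rw [if_pos hu]
      have hbt : ((w, bestD (dpSpec ws) w).1 == u) = true := beq_iff_eq.mpr hu.symm
      rw [hbt, if_pos rfl, hex w, hu]
    · rw [if_neg hu]
      have hbf : ((w, bestD (dpSpec ws) w).1 == u) = false := by
        rw [beq_eq_false_iff_ne]
        exact fun hc => hu hc.symm
      rw [hbf]
      simp only [Bool.false_eq_true, if_false]
      exact hex u
  · intro u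
    rw [dels_fold, pmax_append, hdl u]
  · intro j pat
    rw [subs_fold]
    by_cases hc : j < w.length ∧ pyDelAt w j = pat
    · rw [if_pos hc]
      have hbp : bp j pat (w, bestD (dpSpec ws) w) = true := by
        simp only [bp, hc.1, decide_true, Bool.true_and]
        exact beq_iff_eq.mpr hc.2
      exact inv3_update (dpSpec ws) j pat _ (hsub j pat) w (bestD (dpSpec ws) w) hd1 hbp
    · rw [if_neg hc]
      have hbp : bp j pat (w, bestD (dpSpec ws) w) = false := by
        rcases not_and_or.mp hc with hh | hh
        · simp [bp, hh]
        · simp only [bp]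
          have hb : (pyDelAt w j == pat) = false := beq_eq_false_iff_ne.mpr hh
          rw [hb]
          simp
      exact inv3_frame (dpSpec ws) j pat _ (hsub j pat) w (bestD (dpSpec ws) w) hbp

theorem bInv_final (ws : List (List Char)) :
    BInv ws (ws.foldl bStep (PySem.Dict.empty, PySem.Dict.empty, PySem.Dict.empty, [])) := by
  induction ws using List.reverseRecOn with
  | nil =>
    exact ⟨rfl, fun u => rfl, fun u => rfl,
      fun i pat => ⟨rfl, rfl, fun _ => rfl, fun h0 => absurd rfl h0⟩⟩
  | append_singleton ws w ih =>
    rw [List.foldl_append]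
    exact bInv_step ws _ ih w

theorem aInner_len (ws : List (List Char)) (i : Nat) (L : List Nat) (dp : List Int) :
    (L.foldl (fun dp j => if is_edit_step (ws.getD j []) (ws.getD i []) then
        dp.set i (max (dp.getD i 1) (dp.getD j 1 + 1)) else dp) dp).length = dp.length := by
  induction L generalizing dp with
  | nil => rfl
  | cons j L ih =>
    rw [List.foldl_cons, ih]
    split
    · simp
    · rfl

theorem aInner_frame (ws : List (List Char)) (w : List Char) (i : Nat) (hi : i < ws.length) :
    ∀ (L : List Nat), (∀ j ∈ L, j < ws.length) →
    ∀ (dp : List Int), dp.length = ws.length → ∀ (x : Int),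
    L.foldl (fun dp j => if is_edit_step ((ws ++ [w]).getD j []) ((ws ++ [w]).getD i []) then
        dp.set i (max (dp.getD i 1) (dp.getD j 1 + 1)) else dp) (dp ++ [x])
      = (L.foldl (fun dp j => if is_edit_step (ws.getD j []) (ws.getD i []) then
          dp.set i (max (dp.getD i 1) (dp.getD j 1 + 1)) else dp) dp) ++ [x] := by
  intro L
  induction L with
  | nil => intro _ dp _ x; rfl
  | cons j L ih =>
    intro hL dp hdp x
    have hj := hL j List.mem_cons_self
    rw [List.foldl_cons, List.foldl_cons]
    have hstep : (if is_edit_step ((ws ++ [w]).getD j []) ((ws ++ [w]).getD i []) then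
          (dp ++ [x]).set i (max ((dp ++ [x]).getD i 1) ((dp ++ [x]).getD j 1 + 1))
        else (dp ++ [x]))
        = (if is_edit_step (ws.getD j []) (ws.getD i []) then
            dp.set i (max (dp.getD i 1) (dp.getD j 1 + 1)) else dp) ++ [x] := by
      rw [List.getD_append ws [w] [] j (by omega), List.getD_append ws [w] [] i (by omega)]
      by_cases hcond : is_edit_step (ws.getD j []) (ws.getD i []) = true
      · rw [if_pos hcond, if_pos hcond]
        rw [List.getD_append dp [x] 1 i (by omega), List.getD_append dp [x] 1 j (by omega)]
        rw [List.set_append, if_pos (by omega)]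
      · rw [if_neg hcond, if_neg hcond]
    simp only [hstep]
    exact ih (fun j' hj' => hL j' (List.mem_cons_of_mem _ hj')) _
      (by split <;> simp [hdp]) x

theorem aOuter_frame (ws : List (List Char)) (w : List Char) :
    ∀ (L : List Nat), (∀ i ∈ L, i < ws.length) →
    ∀ (dp : List Int), dp.length = ws.length → ∀ (x : Int),
    L.foldl (fun dp i => (List.range i).foldl (fun dp j =>
        if is_edit_step ((ws ++ [w]).getD j []) ((ws ++ [w]).getD i []) then
          dp.set i (max (dp.getD i 1) (dp.getD j 1 + 1)) else dp) dp) (dp ++ [x])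
      = (L.foldl (fun dp i => (List.range i).foldl (fun dp j =>
          if is_edit_step (ws.getD j []) (ws.getD i []) then
            dp.set i (max (dp.getD i 1) (dp.getD j 1 + 1)) else dp) dp) dp) ++ [x] := by
  intro L
  induction L with
  | nil => intro _ dp _ x; rfl
  | cons i L ih =>
    intro hL dp hdp x
    have hi := hL i List.mem_cons_self
    rw [List.foldl_cons, List.foldl_cons]
    have hstep := aInner_frame ws w i hi (List.range i)
      (fun j hj => by rw [List.mem_range] at hj; omega) dp hdp x
    simp only [hstep]
    exact ih (fun i' hi' => hL i' (List.mem_cons_of_mem _ hi')) _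
      (by rw [aInner_len]; exact hdp) x

theorem aInner_last (ws : List (List Char)) (w : List Char) (dp : List Int)
    (hdp : dp.length = ws.length) :
    ∀ (L : List Nat), (∀ j ∈ L, j < ws.length) → ∀ (m : Int),
    L.foldl (fun dp j =>
        if is_edit_step ((ws ++ [w]).getD j []) ((ws ++ [w]).getD ws.length []) then
          dp.set ws.length (max (dp.getD ws.length 1) (dp.getD j 1 + 1)) else dp) (dp ++ [m])
      = dp ++ [L.foldl (fun m j =>
          if is_edit_step (ws.getD j []) w then max m (dp.getD j 1 + 1) else m) m] := by
  have hgw : (ws ++ [w]).getD ws.length [] = w := by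
    rw [List.getD_eq_getElem?_getD, List.getElem?_concat_length]; rfl
  intro L
  induction L with
  | nil => intro _ m; rfl
  | cons j L ih =>
    intro hL m
    have hj := hL j List.mem_cons_self
    rw [List.foldl_cons, List.foldl_cons]
    have hstep : (if is_edit_step ((ws ++ [w]).getD j []) ((ws ++ [w]).getD ws.length []) then
          (dp ++ [m]).set ws.length
            (max ((dp ++ [m]).getD ws.length 1) ((dp ++ [m]).getD j 1 + 1))
        else (dp ++ [m]))
        = dp ++ [if is_edit_step (ws.getD j []) w then max m (dp.getD j 1 + 1) else m] := by
      rw [List.getD_append ws [w] [] j (by omega), hgw]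
      have h1 : (dp ++ [m]).getD ws.length 1 = m := by
        rw [← hdp, List.getD_eq_getElem?_getD, List.getElem?_concat_length]; rfl
      have h2 : (dp ++ [m]).getD j 1 = dp.getD j 1 := List.getD_append dp [m] 1 j (by omega)
      rw [h1, h2]
      by_cases hcond : is_edit_step (ws.getD j []) w = true
      · rw [if_pos hcond, if_pos hcond]
        rw [List.set_append, if_neg (by omega), show ws.length - dp.length = 0 from by omega]
        rfl
      · rw [if_neg hcond, if_neg hcond]
    simp only [hstep]
    exact ih (fun j' hj' => hL j' (List.mem_cons_of_mem _ hj')) _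

theorem range_fold_bestD (ws : List (List Char)) (w : List Char) : ∀ (a : Int),
    (List.range ws.length).foldl (fun m j => if is_edit_step (ws.getD j []) w then
        max m (((dpSpec ws).map (·.2)).getD j 1 + 1) else m) a
      = (dpSpec ws).foldl (fun m e => if is_edit_step e.1 w then max m (e.2 + 1) else m) a := by
  induction ws using List.reverseRecOn with
  | nil => intro a; rfl
  | append_singleton ws v ih =>
    intro a
    rw [dpSpec_append]
    have hlen : (ws ++ [v]).length = ws.length + 1 := by simp
    rw [hlen, List.range_succ, List.foldl_append, List.foldl_append]
    have hc : (List.range ws.length).foldl (fun m j =>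
          if is_edit_step ((ws ++ [v]).getD j []) w then
            max m (((dpSpec ws ++ [(v, bestD (dpSpec ws) v)]).map (·.2)).getD j 1 + 1) else m) a
        = (List.range ws.length).foldl (fun m j => if is_edit_step (ws.getD j []) w then
            max m (((dpSpec ws).map (·.2)).getD j 1 + 1) else m) a := by
      apply PySem.List.foldl_congr_mem
      intro m j hj
      rw [List.mem_range] at hj
      rw [List.getD_append ws [v] [] j (by omega), List.map_append,
        List.getD_append _ _ 1 j (by simpa [dpSpec_length] using hj)]
    rw [hc, ih a]
    simp only [List.foldl_cons, List.foldl_nil]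
    have hgv : (ws ++ [v]).getD ws.length [] = v := by
      rw [List.getD_eq_getElem?_getD, List.getElem?_concat_length]; rfl
    have hml : ((dpSpec ws).map (·.2)).length = ws.length := by simp [dpSpec_length]
    have hgd : ((dpSpec ws ++ [(v, bestD (dpSpec ws) v)]).map (·.2)).getD ws.length 1
        = bestD (dpSpec ws) v := by
      rw [List.map_append]
      simp only [List.map_cons, List.map_nil]
      rw [← hml, List.getD_eq_getElem?_getD, List.getElem?_concat_length]
      rfl
    rw [hgv, hgd]

-- A's indexed double loop computes the same dp values
theorem aFold_eq (ws : List (List Char)) :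
    ((List.range ws.length).drop 1).foldl (fun dp i =>
      (List.range i).foldl (fun dp j =>
        if is_edit_step (ws.getD j []) (ws.getD i []) then
          dp.set i (max (dp.getD i 1) (dp.getD j 1 + 1))
        else dp) dp) (List.replicate ws.length (1 : Int)) = (dpSpec ws).map (·.2) := by
  induction ws using List.reverseRecOn with
  | nil => rfl
  | append_singleton ws w ih =>
    by_cases hws : ws = []
    · subst hws; rfl
    · have hn : 1 ≤ ws.length := by
        have := List.length_pos_of_ne_nil hws
        omega
      have hlen : (ws ++ [w]).length = ws.length + 1 := by simp
      rw [hlen, List.range_succ, List.drop_append_of_le_length (by simpa using hn)]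
      rw [show List.replicate (ws.length + 1) (1 : Int)
          = List.replicate ws.length 1 ++ [1] from by
        rw [List.replicate_add, List.replicate_one]]
      rw [List.foldl_append]
      rw [aOuter_frame ws w ((List.range ws.length).drop 1)
        (fun i hi => List.mem_range.mp (List.mem_of_mem_drop hi))
        (List.replicate ws.length 1) (by simp) 1]
      rw [ih]
      simp only [List.foldl_cons, List.foldl_nil]
      rw [aInner_last ws w ((dpSpec ws).map (·.2)) (by simp [dpSpec_length])
        (List.range ws.length) (fun j hj => List.mem_range.mp hj) 1]
      rw [range_fold_bestD ws w 1]
      rw [dpSpec_append, List.map_append]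
      rfl

-- ===== VERDICT (by name: the statement is the Claim_ definition above) =====
theorem longest_edit_step_ladder_spec : Claim_equal_longest_edit_step_ladder := by
  intro lexigraf _ _
  show longest_edit_step_ladder lexigraf = longest_edit_step_ladder_alt lexigraf
  unfold longest_edit_step_ladder longest_edit_step_ladder_alt
  simp only [aFold_eq, (bInv_final (lexigraf.map String.toList)).1]
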